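-- pv_equiv track=rewrite | github.com/hitajan/Temp | dict_buscar.py | dic_buscar
-- ===== SOURCE A (Python) =====
-- def dic_buscar(valor):
--
--     d = {"CORDOBA":5000,
--         "MENDOZA":5500,
--         "CHACO":3500,
--         "FORMOSA":3600,
--         "CORRIENTES":3400}
--
--     #ret = None
--
--     #{loc for loc in d.keys() if loc[:len(valor)]==valor}
--
--     # {loc for loc in d.keys() if loc[:len(valor)]==valor}
--     # ------
--     # d2 = {valor:loc for loc in d.keys() if loc[:len(valor)]==valor}
--     #ret = d2.get(valor,"")
--     # ------
--     ret = {valor:loc for loc in d.keys() if loc[:len(valor)]==valor}.get(valor)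
--
--     return ret
-- ===== SOURCE B (Python) =====
-- def dic_buscar(valor):
--     d = {"CORDOBA":5000,
--         "MENDOZA":5500,
--         "CHACO":3500,
--         "FORMOSA":3600,
--         "CORRIENTES":3400}
--     # Precompute a prefix->key index: every prefix of every key maps to the
--     # (last-inserted) key carrying it; the query is then a single dict lookup.
--     tabla = {}
--     for k in d:
--         for i in range(len(k) + 1):
--             tabla[k[:i]] = k
--     return tabla.get(valor)
-- ===== Notes on version B (the rewrite author's own statement) =====
-- stated objective: alternative
-- what changed: Replaces the per-query dict comprehension over the keys (whose single-key overwrite keeps only the last prefix match) with a precomputed prefix->key index: every prefix of every key is mapped to its last owner once, and the query is a single dict lookup.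
import Mathlib
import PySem

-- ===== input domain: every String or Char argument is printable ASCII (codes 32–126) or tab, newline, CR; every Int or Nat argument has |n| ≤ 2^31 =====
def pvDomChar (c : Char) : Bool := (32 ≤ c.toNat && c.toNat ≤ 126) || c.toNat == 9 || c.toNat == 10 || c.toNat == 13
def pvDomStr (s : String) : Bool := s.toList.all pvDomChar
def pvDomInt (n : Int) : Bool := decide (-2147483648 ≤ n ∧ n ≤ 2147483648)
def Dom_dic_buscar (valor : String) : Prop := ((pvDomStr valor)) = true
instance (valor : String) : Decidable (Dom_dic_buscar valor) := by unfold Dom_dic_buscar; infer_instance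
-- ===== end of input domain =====

-- B replaces A's dict-comprehension-plus-.get with a precomputed prefix->key index
-- (every prefix of every key mapped to its last owner, built once) and a single dict
-- lookup of valor (objective: alternative — a different data structure, same cost here).


-- ===== PORT A =====
-- the dict literal's keys, in insertion order
def pvKeysA : List String := ["CORDOBA", "MENDOZA", "CHACO", "FORMOSA", "CORRIENTES"]

-- loc[:len(valor)] == valor  (len(valor) ≥ 0, so the slice is an exact take)
def pvMatchA (valor loc : String) : Bool :=
  PySem.List.slice loc.toList none (some (valor.toList.length : Int)) == valor.toList

def dic_buscar (valor : String) : Option String :=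
  -- {valor: loc for loc in d.keys() if loc[:len(valor)] == valor}.get(valor)
  (pvKeysA.foldl
    (fun acc loc => if pvMatchA valor loc then acc.insert valor loc else acc)
    (PySem.Dict.mk [])).get? valor

-- ===== PORT B =====
-- tabla = {}; for k in d: for i in range(len(k)+1): tabla[k[:i]] = k; return tabla.get(valor)
def pvTablaB : PySem.Dict String String :=
  (["CORDOBA", "MENDOZA", "CHACO", "FORMOSA", "CORRIENTES"] : List String).foldl
    (fun t k =>
      (PySem.List.pyRange 0 (PySem.Str.len k + 1) 1).foldl
        (fun t i => t.insert (PySem.Str.slice k none (some i)) k) t)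
    (PySem.Dict.mk [])

def dic_buscar_alt (valor : String) : Option String :=
  pvTablaB.get? valor

-- ===== PRECONDITION & SPEC =====
def Spec_dic_buscar (valor : String) (out : Option String) : Prop := out = dic_buscar_alt valor
instance (valor : String) (out : Option String) : Decidable (Spec_dic_buscar valor out) := by unfold Spec_dic_buscar; infer_instance

-- ===== CLAIM =====
def Claim_equal_dic_buscar : Prop := ∀ (valor : String), Dom_dic_buscar valor → Spec_dic_buscar valor (dic_buscar valor)

-- ===== LEMMAS AND PROOFS =====
-- shared characterisation: the last key (in dict order) having valor as a prefix
def pvSpec (l : List Char) : Option String :=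
  if PySem.Chars.startswith ['C', 'O', 'R', 'R', 'I', 'E', 'N', 'T', 'E', 'S'] l then some "CORRIENTES"
  else if PySem.Chars.startswith ['F', 'O', 'R', 'M', 'O', 'S', 'A'] l then some "FORMOSA"
  else if PySem.Chars.startswith ['C', 'H', 'A', 'C', 'O'] l then some "CHACO"
  else if PySem.Chars.startswith ['M', 'E', 'N', 'D', 'O', 'Z', 'A'] l then some "MENDOZA"
  else if PySem.Chars.startswith ['C', 'O', 'R', 'D', 'O', 'B', 'A'] l then some "CORDOBA"
  else none

theorem pvMatch_eq_startswith (valor loc : String) :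
    pvMatchA valor loc = PySem.Chars.startswith loc.toList valor.toList := by
  simp only [pvMatchA, PySem.List.slice_to_natCast]
  by_cases h : valor.toList <+: loc.toList
  · have h1 : PySem.Chars.startswith loc.toList valor.toList = true :=
      (PySem.Chars.startswith_iff _ _).2 h
    have h2 : loc.toList.take valor.length = valor.toList := by
      simpa using (List.prefix_iff_eq_take.1 h).symm
    simp [h1, h2]
  · have h1 : PySem.Chars.startswith loc.toList valor.toList = false :=
      Bool.eq_false_iff.2 (fun hc => h ((PySem.Chars.startswith_iff _ _).1 hc))
    have h2 : loc.toList.take valor.length ≠ valor.toList := by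
      intro he
      exact h (by simpa using (he ▸ List.take_prefix valor.length loc.toList : _ <+: _))
    simp [h1, h2]

theorem pvA_eq_spec (valor : String) : dic_buscar valor = pvSpec valor.toList := by
  unfold dic_buscar pvKeysA
  simp only [List.foldl, pvMatch_eq_startswith]
  by_cases h1 : PySem.Chars.startswith ['C', 'O', 'R', 'D', 'O', 'B', 'A'] valor.toList = true <;>
  by_cases h2 : PySem.Chars.startswith ['M', 'E', 'N', 'D', 'O', 'Z', 'A'] valor.toList = true <;>
  by_cases h3 : PySem.Chars.startswith ['C', 'H', 'A', 'C', 'O'] valor.toList = true <;>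
  by_cases h4 : PySem.Chars.startswith ['F', 'O', 'R', 'M', 'O', 'S', 'A'] valor.toList = true <;>
  by_cases h5 : PySem.Chars.startswith ['C', 'O', 'R', 'R', 'I', 'E', 'N', 'T', 'E', 'S'] valor.toList = true <;>
  simp [h1, h2, h3, h4, h5, PySem.Dict.insert, PySem.Dict.get?, pvSpec]

-- if valor is not a prefix of K, it differs from every string whose chars are a prefix of K
theorem pvNe (p valor : String) (K : List Char) (hpre : p.toList <+: K)
    (h : ¬ PySem.Chars.startswith K valor.toList = true) : (p == valor) = false := by
  refine beq_eq_false_iff_ne.mpr (fun he => h ?_)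
  exact (PySem.Chars.startswith_iff _ _).mpr (he ▸ hpre)

-- a prefix hypothesis forces valor to be one of finitely many literals; close by decide
set_option maxRecDepth 100000 in
set_option maxHeartbeats 1000000 in
theorem pvB_eq_spec (valor : String) : dic_buscar_alt valor = pvSpec valor.toList := by
  have key : ∀ (K : List Char), PySem.Chars.startswith K valor.toList = true →
      valor.toList = K.take valor.toList.length ∧ valor.toList.length ≤ K.length := by
    intro K h
    have hp := (PySem.Chars.startswith_iff _ _).1 h
    exact ⟨List.prefix_iff_eq_take.1 hp, hp.length_le⟩
  by_cases h1 : PySem.Chars.startswith ['C', 'O', 'R', 'D', 'O', 'B', 'A'] valor.toList = true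
  · obtain ⟨hl, hn⟩ := key _ h1
    set n := valor.toList.length with hdef
    have hn' : n ≤ 7 := hn
    interval_cases n <;>
      (rw [show valor = String.ofList valor.toList from String.ofList_toList.symm, hl]; decide)
  by_cases h2 : PySem.Chars.startswith ['M', 'E', 'N', 'D', 'O', 'Z', 'A'] valor.toList = true
  · obtain ⟨hl, hn⟩ := key _ h2
    set n := valor.toList.length with hdef
    have hn' : n ≤ 7 := hn
    interval_cases n <;>
      (rw [show valor = String.ofList valor.toList from String.ofList_toList.symm, hl]; decide)
  by_cases h3 : PySem.Chars.startswith ['C', 'H', 'A', 'C', 'O'] valor.toList = true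
  · obtain ⟨hl, hn⟩ := key _ h3
    set n := valor.toList.length with hdef
    have hn' : n ≤ 5 := hn
    interval_cases n <;>
      (rw [show valor = String.ofList valor.toList from String.ofList_toList.symm, hl]; decide)
  by_cases h4 : PySem.Chars.startswith ['F', 'O', 'R', 'M', 'O', 'S', 'A'] valor.toList = true
  · obtain ⟨hl, hn⟩ := key _ h4
    set n := valor.toList.length with hdef
    have hn' : n ≤ 7 := hn
    interval_cases n <;>
      (rw [show valor = String.ofList valor.toList from String.ofList_toList.symm, hl]; decide)
  by_cases h5 : PySem.Chars.startswith ['C', 'O', 'R', 'R', 'I', 'E', 'N', 'T', 'E', 'S'] valor.toList = true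
  · obtain ⟨hl, hn⟩ := key _ h5
    set n := valor.toList.length with hdef
    have hn' : n ≤ 10 := hn
    interval_cases n <;>
      (rw [show valor = String.ofList valor.toList from String.ofList_toList.symm, hl]; decide)
  -- no key has valor as a prefix: every table entry misses and both sides are none
  rw [show dic_buscar_alt valor = (PySem.Dict.mk [
    ("", "CORRIENTES"),
    ("C", "CORRIENTES"),
    ("CO", "CORRIENTES"),
    ("COR", "CORRIENTES"),
    ("CORD", "CORDOBA"),
    ("CORDO", "CORDOBA"),
    ("CORDOB", "CORDOBA"),
    ("CORDOBA", "CORDOBA"),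
    ("M", "MENDOZA"),
    ("ME", "MENDOZA"),
    ("MEN", "MENDOZA"),
    ("MEND", "MENDOZA"),
    ("MENDO", "MENDOZA"),
    ("MENDOZ", "MENDOZA"),
    ("MENDOZA", "MENDOZA"),
    ("CH", "CHACO"),
    ("CHA", "CHACO"),
    ("CHAC", "CHACO"),
    ("CHACO", "CHACO"),
    ("F", "FORMOSA"),
    ("FO", "FORMOSA"),
    ("FOR", "FORMOSA"),
    ("FORM", "FORMOSA"),
    ("FORMO", "FORMOSA"),
    ("FORMOS", "FORMOSA"),
    ("FORMOSA", "FORMOSA"),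
    ("CORR", "CORRIENTES"),
    ("CORRI", "CORRIENTES"),
    ("CORRIE", "CORRIENTES"),
    ("CORRIEN", "CORRIENTES"),
    ("CORRIENT", "CORRIENTES"),
    ("CORRIENTE", "CORRIENTES"),
    ("CORRIENTES", "CORRIENTES")] : PySem.Dict String String).get? valor from rfl]
  simp [PySem.Dict.get?, pvSpec, h1, h2, h3, h4, h5,
    pvNe "" valor ['C', 'O', 'R', 'R', 'I', 'E', 'N', 'T', 'E', 'S'] (by decide) h5,
    pvNe "C" valor ['C', 'O', 'R', 'R', 'I', 'E', 'N', 'T', 'E', 'S'] (by decide) h5,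
    pvNe "CO" valor ['C', 'O', 'R', 'R', 'I', 'E', 'N', 'T', 'E', 'S'] (by decide) h5,
    pvNe "COR" valor ['C', 'O', 'R', 'R', 'I', 'E', 'N', 'T', 'E', 'S'] (by decide) h5,
    pvNe "CORD" valor ['C', 'O', 'R', 'D', 'O', 'B', 'A'] (by decide) h1,
    pvNe "CORDO" valor ['C', 'O', 'R', 'D', 'O', 'B', 'A'] (by decide) h1,
    pvNe "CORDOB" valor ['C', 'O', 'R', 'D', 'O', 'B', 'A'] (by decide) h1,
    pvNe "CORDOBA" valor ['C', 'O', 'R', 'D', 'O', 'B', 'A'] (by decide) h1,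
    pvNe "M" valor ['M', 'E', 'N', 'D', 'O', 'Z', 'A'] (by decide) h2,
    pvNe "ME" valor ['M', 'E', 'N', 'D', 'O', 'Z', 'A'] (by decide) h2,
    pvNe "MEN" valor ['M', 'E', 'N', 'D', 'O', 'Z', 'A'] (by decide) h2,
    pvNe "MEND" valor ['M', 'E', 'N', 'D', 'O', 'Z', 'A'] (by decide) h2,
    pvNe "MENDO" valor ['M', 'E', 'N', 'D', 'O', 'Z', 'A'] (by decide) h2,
    pvNe "MENDOZ" valor ['M', 'E', 'N', 'D', 'O', 'Z', 'A'] (by decide) h2,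
    pvNe "MENDOZA" valor ['M', 'E', 'N', 'D', 'O', 'Z', 'A'] (by decide) h2,
    pvNe "CH" valor ['C', 'H', 'A', 'C', 'O'] (by decide) h3,
    pvNe "CHA" valor ['C', 'H', 'A', 'C', 'O'] (by decide) h3,
    pvNe "CHAC" valor ['C', 'H', 'A', 'C', 'O'] (by decide) h3,
    pvNe "CHACO" valor ['C', 'H', 'A', 'C', 'O'] (by decide) h3,
    pvNe "F" valor ['F', 'O', 'R', 'M', 'O', 'S', 'A'] (by decide) h4,
    pvNe "FO" valor ['F', 'O', 'R', 'M', 'O', 'S', 'A'] (by decide) h4,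
    pvNe "FOR" valor ['F', 'O', 'R', 'M', 'O', 'S', 'A'] (by decide) h4,
    pvNe "FORM" valor ['F', 'O', 'R', 'M', 'O', 'S', 'A'] (by decide) h4,
    pvNe "FORMO" valor ['F', 'O', 'R', 'M', 'O', 'S', 'A'] (by decide) h4,
    pvNe "FORMOS" valor ['F', 'O', 'R', 'M', 'O', 'S', 'A'] (by decide) h4,
    pvNe "FORMOSA" valor ['F', 'O', 'R', 'M', 'O', 'S', 'A'] (by decide) h4,
    pvNe "CORR" valor ['C', 'O', 'R', 'R', 'I', 'E', 'N', 'T', 'E', 'S'] (by decide) h5,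
    pvNe "CORRI" valor ['C', 'O', 'R', 'R', 'I', 'E', 'N', 'T', 'E', 'S'] (by decide) h5,
    pvNe "CORRIE" valor ['C', 'O', 'R', 'R', 'I', 'E', 'N', 'T', 'E', 'S'] (by decide) h5,
    pvNe "CORRIEN" valor ['C', 'O', 'R', 'R', 'I', 'E', 'N', 'T', 'E', 'S'] (by decide) h5,
    pvNe "CORRIENT" valor ['C', 'O', 'R', 'R', 'I', 'E', 'N', 'T', 'E', 'S'] (by decide) h5,
    pvNe "CORRIENTE" valor ['C', 'O', 'R', 'R', 'I', 'E', 'N', 'T', 'E', 'S'] (by decide) h5,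
    pvNe "CORRIENTES" valor ['C', 'O', 'R', 'R', 'I', 'E', 'N', 'T', 'E', 'S'] (by decide) h5]

-- ===== VERDICT =====
theorem dic_buscar_spec : Claim_equal_dic_buscar := by
  intro valor _
  unfold Spec_dic_buscar
  rw [pvA_eq_spec valor, pvB_eq_spec valor]
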